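-- pv_equiv track=rewrite | github.com/hbrunie/tvm_ttile | ttile/conv2d/tensorize/parser.py | sort_reduction_down
-- ===== SOURCE A (Python) =====
-- def sort_reduction_down(out_tensorize):
--     """
--     Sort the array out_tensorize with all reduction axes at the end
--     """
--     out_tensorize_ = []
--     out_tensorize_rec = []
--     for k in range(len(out_tensorize)):
--         if out_tensorize[k][0] == "C" or out_tensorize[k][0] == "H" or out_tensorize[k][0] == "W":
--             out_tensorize_rec.append(out_tensorize[k])
--         else:
--             out_tensorize_.append(out_tensorize[k])
--     for k in range(len(out_tensorize_rec)):
--         out_tensorize_.append(out_tensorize_rec[k])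
--     return out_tensorize_
-- ===== SOURCE B (Python) =====
-- def sort_reduction_down(out_tensorize):
--     """
--     Sort the array out_tensorize with all reduction axes at the end
--     """
--     return sorted(out_tensorize, key=lambda x: x[0] in ("C", "H", "W"))
-- ===== Notes on version B (the rewrite author's own statement) =====
-- stated objective: idiomatic
-- what changed: Replaces the two explicit accumulator lists plus a concatenation loop with a single stable sort on a boolean key (reduction axes sort to the end; Timsort stability preserves relative order within each group).
import Mathlib
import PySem

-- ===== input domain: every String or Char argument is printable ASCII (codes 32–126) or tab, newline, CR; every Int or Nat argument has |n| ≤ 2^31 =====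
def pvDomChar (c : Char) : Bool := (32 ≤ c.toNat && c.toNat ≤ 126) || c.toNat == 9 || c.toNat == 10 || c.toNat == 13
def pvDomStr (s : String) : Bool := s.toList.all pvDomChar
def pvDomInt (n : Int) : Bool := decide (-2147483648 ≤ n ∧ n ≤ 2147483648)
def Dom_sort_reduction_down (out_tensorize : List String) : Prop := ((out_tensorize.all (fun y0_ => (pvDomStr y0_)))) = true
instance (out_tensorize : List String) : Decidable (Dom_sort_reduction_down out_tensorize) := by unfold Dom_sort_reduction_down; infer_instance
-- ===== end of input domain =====

-- B replaces A's two accumulator lists and concatenation loop with one stable sort on a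
-- boolean key (reduction axes sort last, original order kept within each group); objective: idiomatic.

-- The classifying test both Pythons share: x[0] == "C" or x[0] == "H" or x[0] == "W"
-- (A's if-condition; B's `x[0] in ("C","H","W")`).
def isRed (s : String) : Bool :=
  (PySem.Str.pyGet? s 0 == some 'C') || (PySem.Str.pyGet? s 0 == some 'H') ||
    (PySem.Str.pyGet? s 0 == some 'W')

-- ===== PORT A =====
def sort_reduction_down (out_tensorize : List String) : List String :=
  -- first loop: for k in range(len(out_tensorize)): append to one of the two accumulators
  let p : List String × List String :=
    (PySem.List.pyRange 0 (out_tensorize.length : Int) 1).foldl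
      (fun (acc : List String × List String) k =>
        let s := PySem.List.pyGetD out_tensorize k ""
        if isRed s then (acc.1, acc.2 ++ [s]) else (acc.1 ++ [s], acc.2))
      ([], [])
  -- second loop: for k in range(len(out_tensorize_rec)): out_tensorize_.append(...)
  (PySem.List.pyRange 0 (p.2.length : Int) 1).foldl
    (fun acc k => acc ++ [PySem.List.pyGetD p.2 k ""]) p.1

-- ===== PORT B =====
-- Python's bool sort key (False < True) is ported as the Int key 0/1.
def pyBoolKey (s : String) : Int := if isRed s then 1 else 0

def sort_reduction_down_alt (out_tensorize : List String) : List String :=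
  PySem.List.sorted out_tensorize pyBoolKey

-- ===== PRECONDITION & SPEC =====
-- Pre_ excludes lists containing an empty string, on which Python A (and B) raises
-- IndexError at x[0].
def Pre_sort_reduction_down (out_tensorize : List String) : Prop :=
  ∀ s ∈ out_tensorize, s ≠ ""
instance (out_tensorize : List String) : Decidable (Pre_sort_reduction_down out_tensorize) := by
  unfold Pre_sort_reduction_down; infer_instance

def pvWitness_sort_reduction_down : List String := ["Cx", "a", "Hb", "b", "W", "z"]

def Spec_sort_reduction_down (out_tensorize : List String) (out : List String) : Prop := out = sort_reduction_down_alt out_tensorize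
instance (out_tensorize : List String) (out : List String) : Decidable (Spec_sort_reduction_down out_tensorize out) := by unfold Spec_sort_reduction_down; infer_instance

-- ===== CLAIM (what is proved, stated in full; the proofs are below) =====
def Claim_equal_sort_reduction_down : Prop := ∀ (out_tensorize : List String), Dom_sort_reduction_down out_tensorize → Pre_sort_reduction_down out_tensorize → Spec_sort_reduction_down out_tensorize (sort_reduction_down out_tensorize)

-- ===== LEMMAS AND PROOFS =====

theorem key_lt_eq (a b : String) :
    decide (pyBoolKey a < pyBoolKey b) = (!isRed a && isRed b) := by
  unfold pyBoolKey
  cases ha : isRed a <;> cases hb : isRed b <;> simp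

theorem foldl_snoc_eq_append {α : Type} (l : List α) : ∀ acc : List α,
    l.foldl (fun a s => a ++ [s]) acc = acc ++ l := by
  induction l with
  | nil => simp
  | cons x l ih => intro acc; simp [ih, List.append_assoc]

-- insertBy skips over a prefix it does not insert before
theorem insertBy_append_of_forall_not {α : Type} (before : α → α → Bool) (x : α)
    (A B : List α) (h : ∀ a ∈ A, before x a = false) :
    PySem.List.insertBy before x (A ++ B) = A ++ PySem.List.insertBy before x B := by
  induction A with
  | nil => simp
  | cons a A ih =>
      have ha : before x a = false := h a (by simp)
      simp [PySem.List.insertBy, ha, ih (fun y hy => h y (by simp [hy]))]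

-- insertion into an already-partitioned accumulator keeps it partitioned, stably
theorem foldl_insert_partition (xs : List String) :
    ∀ (A B : List String), (∀ a ∈ A, isRed a = false) → (∀ b ∈ B, isRed b = true) →
    xs.foldl (fun acc x => PySem.List.insertBy (fun a b => decide (pyBoolKey a < pyBoolKey b)) x acc) (A ++ B)
      = (A ++ xs.filter (fun s => !isRed s)) ++ (B ++ xs.filter isRed) := by
  induction xs with
  | nil => intro A B _ _; simp
  | cons x xs ih =>
      intro A B hA hB
      simp only [List.foldl_cons]
      cases hx : isRed x
      · -- non-reduction: inserted right after A, before B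
        have hstep : PySem.List.insertBy (fun a b => decide (pyBoolKey a < pyBoolKey b)) x (A ++ B)
            = (A ++ [x]) ++ B := by
          rw [insertBy_append_of_forall_not _ _ A B
            (fun a ha => by rw [key_lt_eq]; simp [hA a ha])]
          cases B with
          | nil => simp [PySem.List.insertBy]
          | cons b B' =>
              have : decide (pyBoolKey x < pyBoolKey b) = true := by
                rw [key_lt_eq]; simp [hx, hB b (by simp)]
              simp [PySem.List.insertBy, this]
        rw [hstep, ih (A ++ [x]) B
          (fun a ha => by rcases List.mem_append.mp ha with h | h
                          · exact hA a h
                          · simp at h; simpa [h] using hx) hB]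
        simp [hx, List.append_assoc]
      · -- reduction: inserted at the very end
        have hstep : PySem.List.insertBy (fun a b => decide (pyBoolKey a < pyBoolKey b)) x (A ++ B)
            = A ++ (B ++ [x]) := by
          rw [PySem.List.insertBy_of_forall_not_before _ _ _
            (fun y hy => by
              rw [key_lt_eq]
              rcases List.mem_append.mp hy with h | h
              · simp [hx]
              · simp [hx, hB y h])]
          simp
        rw [hstep, ih A (B ++ [x]) hA
          (fun b hb => by rcases List.mem_append.mp hb with h | h
                          · exact hB b h
                          · simp at h; simpa [h] using hx)]
        simp [hx, List.append_assoc]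

-- B's stable sort on the 0/1 key is the stable partition
theorem alt_eq_partition (xs : List String) :
    sort_reduction_down_alt xs = xs.filter (fun s => !isRed s) ++ xs.filter isRed := by
  unfold sort_reduction_down_alt
  rw [PySem.List.sorted_eq_foldl_insertBy]
  have := foldl_insert_partition xs [] [] (by simp) (by simp)
  simpa using this

-- A's two loops also produce the stable partition
theorem a_eq_partition (xs : List String) :
    sort_reduction_down xs = xs.filter (fun s => !isRed s) ++ xs.filter isRed := by
  unfold sort_reduction_down
  simp only []
  rw [PySem.List.foldl_pyRange_zero_pyGetD' xs ""
    (fun (acc : List String × List String) s =>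
      if isRed s then (acc.1, acc.2 ++ [s]) else (acc.1 ++ [s], acc.2)) ([], [])]
  have hpair : ∀ (l A B : List String),
      l.foldl (fun (acc : List String × List String) s =>
        if isRed s then (acc.1, acc.2 ++ [s]) else (acc.1 ++ [s], acc.2)) (A, B)
      = (A ++ l.filter (fun s => !isRed s), B ++ l.filter isRed) := by
    intro l
    induction l with
    | nil => intro A B; simp
    | cons x l ih =>
        intro A B
        cases hx : isRed x <;> simp [hx, ih, List.append_assoc]
  rw [hpair]
  rw [PySem.List.foldl_pyRange_zero_pyGetD' _ ""
    (fun (acc : List String) s => acc ++ [s]) _]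
  exact foldl_snoc_eq_append _ _

-- ===== VERDICT (by name: the statement is the Claim_ definition above) =====
theorem sort_reduction_down_spec : Claim_equal_sort_reduction_down := by
  intro xs _ _
  unfold Spec_sort_reduction_down
  rw [a_eq_partition, alt_eq_partition]
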